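-- pv_equiv track=rewrite | github.com/varshakrishnakumar/human-factors-simulator | sim/domain/conditions.py | balanced_condition
-- ===== SOURCE A (Python) =====
-- from typing import Dict, List, Optional, Tuple
--
-- def balanced_condition(
--     experience: str,
--     counts: Dict[Tuple[str, str], int],
--     condition_keys: List[str],
-- ) -> str:
--     """Pick the condition with the fewest prior assignments for this experience
--     level (first tie-breaker: lowest overall count for that condition; second
--     tie-breaker: list order). Falls back to the first condition key when
--     `counts` is empty. Called by sinks.balanced_condition() after it fetches
--     real counts from Sheets; also called directly by tests with fake counts."""
--     if not condition_keys:
--         return ""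
--     best_key: Optional[str] = None
--     best_score: Optional[Tuple[int, int]] = None
--     totals: Dict[str, int] = {
--         c: sum(n for (cond, _), n in counts.items() if cond == c)
--         for c in condition_keys
--     }
--     for c in condition_keys:
--         per_exp = counts.get((c, experience), 0)
--         score = (per_exp, totals[c])
--         if best_score is None or score < best_score:
--             best_score = score
--             best_key = c
--     return best_key or condition_keys[0]
-- ===== SOURCE B (Python) =====
-- from typing import Dict, List, Tuple
--
-- def balanced_condition(
--     experience: str,
--     counts: Dict[Tuple[str, str], int],
--     condition_keys: List[str],
-- ) -> str:
--     if not condition_keys: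
--         return ""
--     totals: Dict[str, int] = {}
--     per: Dict[str, int] = {}
--     for (cond, exp), n in counts.items():
--         totals[cond] = totals.get(cond, 0) + n
--         if exp == experience:
--             per[cond] = n
--     best = min(condition_keys, key=lambda c: (per.get(c, 0), totals.get(c, 0)))
--     return best or condition_keys[0]
-- ===== Notes on version B (the rewrite author's own statement) =====
-- stated objective: faster
-- what changed: Instead of recomputing each condition's overall total by scanning all of counts once per condition key (O(K*M)), B makes one pass over counts accumulating per-condition totals and per-(condition,experience) counts into two dicts, then picks the winner with Python's stable min and a lexicographic tuple key (O(M+K)), keeping A's documented falsy fallback to the first key.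
import Mathlib
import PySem

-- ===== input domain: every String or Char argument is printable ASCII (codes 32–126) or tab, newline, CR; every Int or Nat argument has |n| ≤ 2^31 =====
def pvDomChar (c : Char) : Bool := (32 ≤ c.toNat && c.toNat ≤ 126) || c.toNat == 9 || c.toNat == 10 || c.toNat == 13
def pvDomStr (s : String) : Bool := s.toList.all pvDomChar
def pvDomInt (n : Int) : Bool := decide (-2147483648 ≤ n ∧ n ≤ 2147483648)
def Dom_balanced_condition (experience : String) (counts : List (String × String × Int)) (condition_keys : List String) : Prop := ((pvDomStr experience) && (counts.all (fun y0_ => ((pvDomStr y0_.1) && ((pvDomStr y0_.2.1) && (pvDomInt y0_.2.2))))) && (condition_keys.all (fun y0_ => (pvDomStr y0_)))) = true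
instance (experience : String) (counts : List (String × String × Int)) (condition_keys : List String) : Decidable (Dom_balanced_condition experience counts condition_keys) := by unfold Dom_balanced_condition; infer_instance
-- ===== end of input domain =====

-- B replaces A's per-key rescans of counts by one accumulating pass over counts plus a stable lexicographic min over the keys (measurably faster).


-- ===== PORT A =====
def balanced_condition (experience : String) (counts : List (String × String × Int)) (condition_keys : List String) : String :=
  if condition_keys.isEmpty then "" else
    -- the dict argument `counts` as a Python dict (assoc list marshalled with dict semantics)
    let d : PySem.Dict (String × String) Int := PySem.Dict.ofList (counts.map (fun t => ((t.1, t.2.1), t.2.2)))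
    -- totals = {c: sum(n for (cond, _), n in counts.items() if cond == c) for c in condition_keys}
    let totals : PySem.Dict String Int :=
      condition_keys.foldl (fun td c =>
        td.insert c (d.items.foldl (fun s p => if p.1.1 == c then s + p.2 else s) 0)) PySem.Dict.empty
    -- the selection loop; state = (best_key, best_score).  totals[c] is a plain lookup that never
    -- raises here (every c was inserted just above), ported as getD with default 0.
    let st := condition_keys.foldl (fun (st : Option String × Option (Int × Int)) c =>
        match st.2 with
        | none => (some c, some (d.getD (c, experience) 0, totals.getD c 0))
        | some best =>
          if (d.getD (c, experience) 0, totals.getD c 0).1 < best.1 ∨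
             ((d.getD (c, experience) 0, totals.getD c 0).1 = best.1 ∧
              (d.getD (c, experience) 0, totals.getD c 0).2 < best.2)
          then (some c, some (d.getD (c, experience) 0, totals.getD c 0)) else st)
      ((none, none) : Option String × Option (Int × Int))
    -- return best_key or condition_keys[0]   (falsy best_key — None or "" — falls back)
    match st.1 with
    | some k => if k == "" then condition_keys.headD "" else k
    | none => condition_keys.headD ""

-- ===== PORT B =====
def balanced_condition_alt (experience : String) (counts : List (String × String × Int)) (condition_keys : List String) : String :=
  if condition_keys.isEmpty then "" else
    let d : PySem.Dict (String × String) Int := PySem.Dict.ofList (counts.map (fun t => ((t.1, t.2.1), t.2.2)))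
    -- one pass: totals[cond] += n;  if exp == experience: per[cond] = n
    let tp := d.items.foldl (fun (tp : PySem.Dict String Int × PySem.Dict String Int) p =>
        (tp.1.insert p.1.1 (tp.1.getD p.1.1 0 + p.2),
         if p.1.2 == experience then tp.2.insert p.1.1 p.2 else tp.2))
      (PySem.Dict.empty, PySem.Dict.empty)
    -- best = min(condition_keys, key=lambda c: (per.get(c, 0), totals.get(c, 0)))
    let best := (PySem.List.min2? condition_keys (fun c => tp.2.getD c 0) (fun c => tp.1.getD c 0)).getD ""
    -- return best or condition_keys[0]
    if best == "" then condition_keys.headD "" else best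

-- ===== PRECONDITION & SPEC =====
def Spec_balanced_condition (experience : String) (counts : List (String × String × Int)) (condition_keys : List String) (out : String) : Prop := out = balanced_condition_alt experience counts condition_keys
instance (experience : String) (counts : List (String × String × Int)) (condition_keys : List String) (out : String) : Decidable (Spec_balanced_condition experience counts condition_keys out) := by unfold Spec_balanced_condition; infer_instance

-- ===== CLAIM (what is proved, stated in full; the proofs are below) =====
def Claim_equal_balanced_condition : Prop := ∀ (experience : String) (counts : List (String × String × Int)) (condition_keys : List String), Dom_balanced_condition experience counts condition_keys → Spec_balanced_condition experience counts condition_keys (balanced_condition experience counts condition_keys)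

-- ===== LEMMAS AND PROOFS =====

-- A's totals dict: looking up a key that was inserted by the comprehension gives its value.
theorem getD_foldl_insert_fun_of_not_mem (f : String → Int) (ck : List String) (c : String)
    (h : c ∉ ck) : ∀ (d0 : PySem.Dict String Int),
    (ck.foldl (fun td c' => td.insert c' (f c')) d0).getD c 0 = d0.getD c 0 := by
  induction ck with
  | nil => intro d0; rfl
  | cons x t ih =>
    intro d0
    simp only [List.foldl_cons]
    rw [ih (by simp_all [List.mem_cons])]
    exact PySem.Dict.getD_insert_of_ne _ _ _ (by simp_all [List.mem_cons])

theorem getD_foldl_insert_fun (f : String → Int) (ck : List String) (c : String)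
    (h : c ∈ ck) : ∀ (d0 : PySem.Dict String Int),
    (ck.foldl (fun td c' => td.insert c' (f c')) d0).getD c 0 = f c := by
  induction ck with
  | nil => cases h
  | cons x t ih =>
    intro d0
    simp only [List.foldl_cons]
    by_cases hc : c ∈ t
    · exact ih hc _
    · have hx : c = x := by rcases List.mem_cons.1 h with h1 | h1 <;> simp_all
      subst hx
      rw [getD_foldl_insert_fun_of_not_mem f t c hc]
      exact PySem.Dict.getD_insert_self _ _ _ _

-- B's totals accumulator: getD after the accumulating pass is the filtered sum.
theorem getD_totals_fold (c : String) :
    ∀ (l : List ((String × String) × Int)) (d0 : PySem.Dict String Int),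
    (l.foldl (fun d p => d.insert p.1.1 (d.getD p.1.1 0 + p.2)) d0).getD c 0
      = d0.getD c 0 + ((l.filter (fun p => p.1.1 == c)).map (·.2)).sum := by
  intro l
  induction l with
  | nil => intro d0; simp
  | cons p t ih =>
    intro d0
    simp only [List.foldl_cons, List.filter_cons]
    by_cases hc : p.1.1 = c
    · simp only [hc, beq_self_eq_true, if_pos, List.map_cons, List.sum_cons]
      rw [ih, PySem.Dict.getD_insert_self]
      ring
    · have : (p.1.1 == c) = false := by simp [hc]
      simp only [this, if_neg, Bool.false_eq_true, not_false_iff]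
      rw [ih, PySem.Dict.getD_insert_of_ne _ _ _ (fun h => hc h.symm)]

-- B's per accumulator over a list with distinct keys: getD c is the value of the unique
-- ((c, e), n) item, if any.
theorem getD_per_fold (e c : String) :
    ∀ (l : List ((String × String) × Int)) (d0 : PySem.Dict String Int),
    (l.map (·.1)).Nodup →
    (l.foldl (fun d p => if p.1.2 == e then d.insert p.1.1 p.2 else d) d0).getD c 0
      = (match l.find? (fun p => p.1 == (c, e)) with
         | some q => q.2
         | none => d0.getD c 0) := by
  intro l
  induction l with
  | nil => intro d0 _; rfl
  | cons p t ih =>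
    intro d0 hn
    have hn' : (t.map (·.1)).Nodup := by simpa using hn.of_cons
    simp only [List.foldl_cons, List.find?_cons]
    by_cases hp : p.1 = (c, e)
    · have hb : (p.1 == (c, e)) = true := by simp [hp]
      simp only [hb]
      have he : (p.1.2 == e) = true := by simp [hp]
      simp only [he, if_pos]
      have hnot : t.find? (fun q => q.1 == (c, e)) = none := by
        rw [List.find?_eq_none]
        intro q hq hqe
        have : p.1 ∈ t.map (·.1) := by
          rw [hp, ← (by simpa using hqe : q.1 = (c, e))]
          exact List.mem_map_of_mem hq
        simp_all [List.nodup_cons]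
      rw [ih _ hn', hnot]
      have : p.1.1 = c := by simp [hp]
      rw [this, PySem.Dict.getD_insert_self]
    · have hb : (p.1 == (c, e)) = false := by simp [hp]
      simp only [hb]
      by_cases he : p.1.2 = e
      · have he' : (p.1.2 == e) = true := by simp [he]
        simp only [he', if_pos]
        rw [ih _ hn']
        have hne : c ≠ p.1.1 := by
          intro hcc
          exact hp (by cases p with | mk a b => cases a with | mk a1 a2 => simp_all)
        cases hfind : t.find? (fun q => q.1 == (c, e)) with
        | some q => rfl
        | none => exact PySem.Dict.getD_insert_of_ne _ _ _ hne
      · have he' : (p.1.2 == e) = false := by simp [he]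
        simp only [he', Bool.false_eq_true, if_neg, not_false_iff]
        exact ih _ hn'

-- A's dict lookup counts.get((c, e), 0) as a find? over the item list (keys distinct).
theorem getD_eq_find? (d : PySem.Dict (String × String) Int) (c e : String)
    (hn : d.keys.Nodup) :
    d.getD (c, e) 0 = (match d.items.find? (fun p => p.1 == (c, e)) with
                       | some q => q.2
                       | none => (0 : Int)) := by
  cases hfind : d.items.find? (fun p => p.1 == (c, e)) with
  | some q =>
    have hq := List.find?_some hfind
    have hqm := List.mem_of_find?_eq_some hfind
    have hq1 : q.1 = (c, e) := by simpa using hq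
    have hmem : ((c, e), q.2) ∈ d.items := by rw [← hq1]; exact hqm
    exact PySem.Dict.getD_of_mem_items d hmem hn 0
  | none =>
    have hc : d.contains (c, e) = false := by
      rw [List.find?_eq_none] at hfind
      by_contra h
      have h' : d.contains (c, e) = true := by
        revert h; cases d.contains (c, e) <;> simp
      have hk : (c, e) ∈ d.keys := (PySem.Dict.contains_iff_mem_keys d (c, e)).1 h'
      have hk' : ∃ v, ((c, e), v) ∈ d.items := by simpa [PySem.Dict.keys] using hk
      rcases hk' with ⟨v, hv⟩
      have hcontr := hfind _ hv
      simp at hcontr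
    exact PySem.Dict.getD_of_not_contains d 0 hc

-- The two selection loops agree: A's explicit best/score fold equals min2?'s fold whenever the
-- two score functions agree on the traversed keys (and on the key stored in the accumulator).
theorem fold_min_eq (sA : String → Int × Int) (k1 k2 : String → Int) :
    ∀ (l : List String) (m : Option String),
    (∀ x ∈ l, sA x = (k1 x, k2 x)) → (∀ x, m = some x → sA x = (k1 x, k2 x)) →
    l.foldl (fun st c =>
        match st.2 with
        | none => (some c, some (sA c))
        | some best =>
          if (sA c).1 < best.1 ∨ ((sA c).1 = best.1 ∧ (sA c).2 < best.2)
          then (some c, some (sA c)) else st)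
      (m, m.map sA)
    = ((l.foldl (fun acc x =>
          match acc with
          | none => some x
          | some b =>
            if (decide (k1 x < k1 b) || !decide (k1 b < k1 x) && decide (k2 x < k2 b)) = true
            then some x else some b) m),
       (l.foldl (fun acc x =>
          match acc with
          | none => some x
          | some b =>
            if (decide (k1 x < k1 b) || !decide (k1 b < k1 x) && decide (k2 x < k2 b)) = true
            then some x else some b) m).map sA) := by
  intro l
  induction l with
  | nil => intro m _ _; rfl
  | cons c t ih =>
    intro m hl hm
    have hc := hl c (List.mem_cons_self ..)
    cases m with
    | none =>
      simp only [List.foldl_cons, Option.map_none]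
      exact ih (some c) (fun x hx => hl x (List.mem_cons_of_mem _ hx))
        (fun x hx => by cases hx; exact hc)
    | some b =>
      have hb := hm b rfl
      simp only [List.foldl_cons, Option.map_some]
      have hcond : ((sA c).1 < (sA b).1 ∨ ((sA c).1 = (sA b).1 ∧ (sA c).2 < (sA b).2)) ↔
          ((decide (k1 c < k1 b) || !decide (k1 b < k1 c) && decide (k2 c < k2 b)) = true) := by
        rw [hc, hb]
        simp only [Bool.or_eq_true, Bool.and_eq_true, Bool.not_eq_true', decide_eq_true_eq,
          decide_eq_false_iff_not]
        constructor
        · rintro (h | ⟨h1, h2⟩)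
          · exact Or.inl h
          · exact Or.inr ⟨by omega, h2⟩
        · rintro (h | ⟨h1, h2⟩)
          · exact Or.inl h
          · by_cases hlt : k1 c < k1 b
            · exact Or.inl hlt
            · exact Or.inr ⟨by omega, h2⟩
      by_cases h : (sA c).1 < (sA b).1 ∨ ((sA c).1 = (sA b).1 ∧ (sA c).2 < (sA b).2)
      · have h' := hcond.1 h
        simp only [if_pos h, h']
        simp only [if_pos]
        exact ih (some c) (fun x hx => hl x (List.mem_cons_of_mem _ hx))
          (fun x hx => by cases hx; exact hc)
      · have h' : ¬ ((decide (k1 c < k1 b) || !decide (k1 b < k1 c) && decide (k2 c < k2 b)) = true) :=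
          fun hh => h (hcond.2 hh)
        simp only [if_neg h, if_neg h']
        exact ih (some b) (fun x hx => hl x (List.mem_cons_of_mem _ hx)) hm

-- First-minimum selection folds over `some b` stay `some` and return an element seen so far.
theorem foldl_pick_mem (p : String → String → Bool) :
    ∀ (t : List String) (b : String),
    ∃ y, t.foldl (fun acc x =>
        match acc with
        | none => some x
        | some m => if p x m = true then some x else some m) (some b) = some y ∧ (y = b ∨ y ∈ t) := by
  intro t
  induction t with
  | nil => intro b; exact ⟨b, rfl, Or.inl rfl⟩
  | cons x t ih =>
    intro b
    simp only [List.foldl_cons]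
    by_cases h : p x b = true
    · rw [if_pos h]
      obtain ⟨y, hy, hm⟩ := ih x
      exact ⟨y, hy, by rcases hm with h1 | h1 <;> simp [h1]⟩
    · rw [if_neg h]
      obtain ⟨y, hy, hm⟩ := ih b
      exact ⟨y, hy, by rcases hm with h1 | h1 <;> simp [h1]⟩

-- ===== VERDICT (by name: the statement is the Claim_ definition above) =====
theorem balanced_condition_spec : Claim_equal_balanced_condition := by
  intro experience counts condition_keys _
  unfold Spec_balanced_condition balanced_condition balanced_condition_alt
  cases condition_keys with
  | nil => rfl
  | cons c0 ck =>
    simp only [List.isEmpty_cons, Bool.false_eq_true, if_false]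
    set D : PySem.Dict (String × String) Int :=
      PySem.Dict.ofList (counts.map (fun t => ((t.1, t.2.1), t.2.2))) with hD
    have hd : D.keys.Nodup := by rw [hD]; exact PySem.Dict.nodup_keys_ofList _
    have hn' : (D.items.map (fun x => x.1)).Nodup := by
      simpa [PySem.Dict.keys] using hd
    rw [PySem.List.foldl_prod_mk
      (f := fun (d : PySem.Dict String Int) (p : (String × String) × Int) =>
        d.insert p.1.1 (d.getD p.1.1 0 + p.2))
      (g := fun (d : PySem.Dict String Int) (p : (String × String) × Int) =>
        if p.1.2 == experience then d.insert p.1.1 p.2 else d)]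
    dsimp only
    have hB : PySem.List.min2? (c0 :: ck)
        (fun c => (List.foldl (fun d p => if p.1.2 == experience then d.insert p.1.1 p.2 else d)
          PySem.Dict.empty D.items).getD c 0)
        (fun c => (List.foldl (fun d p => d.insert p.1.1 (d.getD p.1.1 0 + p.2))
          PySem.Dict.empty D.items).getD c 0)
        = List.foldl (fun acc x =>
        match acc with
        | none => some x
        | some b =>
          if (decide ((List.foldl (fun d p => if p.1.2 == experience then d.insert p.1.1 p.2 else d)
          PySem.Dict.empty D.items).getD x 0 < (List.foldl (fun d p => if p.1.2 == experience then d.insert p.1.1 p.2 else d)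
          PySem.Dict.empty D.items).getD b 0)
              || !decide ((List.foldl (fun d p => if p.1.2 == experience then d.insert p.1.1 p.2 else d)
          PySem.Dict.empty D.items).getD b 0 < (List.foldl (fun d p => if p.1.2 == experience then d.insert p.1.1 p.2 else d)
          PySem.Dict.empty D.items).getD x 0)
                 && decide ((List.foldl (fun d p => d.insert p.1.1 (d.getD p.1.1 0 + p.2))
          PySem.Dict.empty D.items).getD x 0 < (List.foldl (fun d p => d.insert p.1.1 (d.getD p.1.1 0 + p.2))
          PySem.Dict.empty D.items).getD b 0)) = true
          then some x else some b) none (c0 :: ck) := by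
      simp only [PySem.List.min2?]
      apply PySem.List.foldl_congr_mem
      intro acc x _
      cases acc <;> rfl
    rw [hB]
    have hsc : ∀ x ∈ c0 :: ck,
        ((D.getD (x, experience) 0,
          (List.foldl (fun td c => td.insert c
              (List.foldl (fun s p => if p.1.1 == c then s + p.2 else s) 0 D.items))
            PySem.Dict.empty (c0 :: ck)).getD x 0) : Int × Int)
        = ((List.foldl (fun d p => if p.1.2 == experience then d.insert p.1.1 p.2 else d)
              PySem.Dict.empty D.items).getD x 0,
           (List.foldl (fun d p => d.insert p.1.1 (d.getD p.1.1 0 + p.2))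
              PySem.Dict.empty D.items).getD x 0) := by
      intro x hx
      have h1 : D.getD (x, experience) 0
          = (List.foldl (fun d p => if p.1.2 == experience then d.insert p.1.1 p.2 else d)
              PySem.Dict.empty D.items).getD x 0 := by
        rw [getD_eq_find? D x experience hd, getD_per_fold experience x D.items PySem.Dict.empty hn']
        simp only [PySem.Dict.getD_empty]
      have h2 : (List.foldl (fun td c => td.insert c
              (List.foldl (fun s p => if p.1.1 == c then s + p.2 else s) 0 D.items))
            PySem.Dict.empty (c0 :: ck)).getD x 0
          = (List.foldl (fun d p => d.insert p.1.1 (d.getD p.1.1 0 + p.2))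
              PySem.Dict.empty D.items).getD x 0 := by
        rw [getD_foldl_insert_fun
          (f := fun c => List.foldl (fun s p => if p.1.1 == c then s + p.2 else s) 0 D.items)
          (c0 :: ck) x hx]
        rw [getD_totals_fold x D.items PySem.Dict.empty]
        rw [PySem.List.foldl_if_eq_foldl_filter (fun p => p.1.1 == x) (fun s p => s + p.2) D.items 0]
        rw [PySem.List.foldl_add (List.filter (fun p => p.1.1 == x) D.items) (fun p => p.2) 0]
        simp [PySem.Dict.getD_empty]
      rw [h1, h2]
    have hfold := fold_min_eq
      (fun c => ((D.getD (c, experience) 0,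
        (List.foldl (fun td c' => td.insert c'
            (List.foldl (fun s p => if p.1.1 == c' then s + p.2 else s) 0 D.items))
          PySem.Dict.empty (c0 :: ck)).getD c 0) : Int × Int))
      (fun c => (List.foldl (fun d p => if p.1.2 == experience then d.insert p.1.1 p.2 else d)
          PySem.Dict.empty D.items).getD c 0)
      (fun c => (List.foldl (fun d p => d.insert p.1.1 (d.getD p.1.1 0 + p.2))
          PySem.Dict.empty D.items).getD c 0)
      (c0 :: ck) none hsc (fun x hx => nomatch hx)
    simp only [Option.map_none] at hfold
    rw [hfold]
    dsimp only
    obtain ⟨y, hy, -⟩ := foldl_pick_mem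
      (fun x b =>
        decide ((List.foldl (fun d p => if p.1.2 == experience then d.insert p.1.1 p.2 else d)
          PySem.Dict.empty D.items).getD x 0 < (List.foldl (fun d p => if p.1.2 == experience then d.insert p.1.1 p.2 else d)
          PySem.Dict.empty D.items).getD b 0)
        || !decide ((List.foldl (fun d p => if p.1.2 == experience then d.insert p.1.1 p.2 else d)
          PySem.Dict.empty D.items).getD b 0 < (List.foldl (fun d p => if p.1.2 == experience then d.insert p.1.1 p.2 else d)
          PySem.Dict.empty D.items).getD x 0)
           && decide ((List.foldl (fun d p => d.insert p.1.1 (d.getD p.1.1 0 + p.2))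
          PySem.Dict.empty D.items).getD x 0 < (List.foldl (fun d p => d.insert p.1.1 (d.getD p.1.1 0 + p.2))
          PySem.Dict.empty D.items).getD b 0))
      ck c0
    rw [List.foldl_cons]
    dsimp only
    rw [hy]
    rfl
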